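-- pv_equiv track=rewrite | github.com/sashhhaka/DS-AI-practice | NatureInspiredComputing/CrosswordGeneration/crossword_generation.py | check_for_duplicates
-- ===== SOURCE A (Python) =====
-- def check_for_duplicates(crossword):
--     """
--     Checks if there are duplicate words in the crossword
--     :param crossword: a tuple (word, position, direction)
--     :return: True if there are duplicate words, False otherwise
--     """
--     words = []
--     for word in crossword:
--         words.append(word[0])
--     for i in range(len(words)):
--         for j in range(i + 1, len(words)):
--             if words[i] == words[j]:
--                 return True
--     return False
-- ===== SOURCE B (Python) =====
-- def check_for_duplicates(crossword):
--     """
--     Checks if there are duplicate words in the crossword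
--     :param crossword: a tuple (word, position, direction)
--     :return: True if there are duplicate words, False otherwise
--     """
--     words = [word[0] for word in crossword]
--     return len(set(words)) != len(words)
-- ===== Notes on version B (the rewrite author's own statement) =====
-- stated objective: idiomatic
-- what changed: Replaces the nested pairwise index scan with the standard set-cardinality check: duplicates exist iff len(set(words)) differs from len(words).
import Mathlib
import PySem

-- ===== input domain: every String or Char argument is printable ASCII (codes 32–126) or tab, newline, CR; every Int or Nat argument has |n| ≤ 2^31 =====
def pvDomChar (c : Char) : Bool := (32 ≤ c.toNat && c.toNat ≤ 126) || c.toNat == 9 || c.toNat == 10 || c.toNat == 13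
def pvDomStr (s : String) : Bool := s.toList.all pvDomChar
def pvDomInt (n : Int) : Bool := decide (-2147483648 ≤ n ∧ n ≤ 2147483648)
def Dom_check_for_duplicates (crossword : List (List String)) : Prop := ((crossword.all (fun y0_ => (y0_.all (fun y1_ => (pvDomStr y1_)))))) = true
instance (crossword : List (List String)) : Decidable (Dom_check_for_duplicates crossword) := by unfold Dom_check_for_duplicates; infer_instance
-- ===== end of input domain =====

-- B replaces A's nested pairwise scan with the idiomatic set-cardinality check (len(set(words)) != len(words)).

-- ===== PORT A =====
-- inner loop: for j in range(i+1, len(words)): if words[i] == words[j]: return True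
def pvInnerA (w : String) : List String → Bool
  | [] => false
  | y :: ys => if w == y then true else pvInnerA w ys

-- outer loop over i (words[i] is the head of the remaining suffix)
def pvOuterA : List String → Bool
  | [] => false
  | w :: ws => if pvInnerA w ws then true else pvOuterA ws

-- word[0] is ported as pyGetD word 0 ""; exact under Pre_ (every entry nonempty; Python raises IndexError otherwise)
def check_for_duplicates (crossword : List (List String)) : Bool :=
  pvOuterA (crossword.map (fun word => PySem.List.pyGetD word 0 ""))

-- ===== PORT B =====
def check_for_duplicates_alt (crossword : List (List String)) : Bool :=
  let words := crossword.map (fun word => PySem.List.pyGetD word 0 "")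
  decide ((PySem.Set.ofList words).length ≠ words.length)

-- ===== PRECONDITION & SPEC =====
-- Pre_ excludes crosswords with an empty entry: there word[0] raises IndexError in both A and B.
def Pre_check_for_duplicates (crossword : List (List String)) : Prop :=
  ∀ w ∈ crossword, w ≠ []
instance (crossword : List (List String)) : Decidable (Pre_check_for_duplicates crossword) := by
  unfold Pre_check_for_duplicates; infer_instance

def pvWitness_check_for_duplicates : List (List String) := [["cat", "0,0", "h"], ["dog", "1,1", "v"], ["cat", "2,2", "h"]]

def Spec_check_for_duplicates (crossword : List (List String)) (out : Bool) : Prop := out = check_for_duplicates_alt crossword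
instance (crossword : List (List String)) (out : Bool) : Decidable (Spec_check_for_duplicates crossword out) := by unfold Spec_check_for_duplicates; infer_instance

-- ===== CLAIM (what is proved, stated in full; the proofs are below) =====
def Claim_equal_check_for_duplicates : Prop := ∀ (crossword : List (List String)), Dom_check_for_duplicates crossword → Pre_check_for_duplicates crossword → Spec_check_for_duplicates crossword (check_for_duplicates crossword)

-- ===== LEMMAS AND PROOFS =====

-- A-side: the inner loop is membership in the suffix
theorem pvInnerA_eq_contains (w : String) (ys : List String) :
    pvInnerA w ys = decide (w ∈ ys) := by
  induction ys with
  | nil => simp [pvInnerA]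
  | cons y ys ih =>
    by_cases h : w = y
    · simp [pvInnerA, h]
    · simp [pvInnerA, h, ih]

-- A-side: the nested scan decides ¬Nodup
theorem pvOuterA_eq_not_nodup (ws : List String) :
    pvOuterA ws = decide (¬ ws.Nodup) := by
  induction ws with
  | nil => simp [pvOuterA]
  | cons w ws ih =>
    by_cases h : w ∈ ws
    · simp [pvOuterA, pvInnerA_eq_contains, h, List.nodup_cons]
    · simp [pvOuterA, pvInnerA_eq_contains, h, ih, List.nodup_cons]

-- B-side helper: discarding an absent element is a no-op
theorem discard_of_not_mem {s : List String} {x : String} (h : x ∉ s) :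
    PySem.Set.discard s x = s := by
  induction s with
  | nil => rfl
  | cons y ys ih =>
    simp only [List.mem_cons, not_or] at h
    simp [PySem.Set.discard, Ne.symm h.1]
    intro a ha hax
    exact h.2 (hax ▸ ha)

-- B-side helper: discard shortens a list containing x
theorem length_discard_lt {s : List String} {x : String} (h : x ∈ s) :
    (PySem.Set.discard s x).length < s.length := by
  have hx : PySem.Set.discard s x = s.filter (fun y => !(y == x)) := rfl
  rw [hx]
  refine List.length_filter_lt_length_iff_exists.mpr ⟨x, h, ?_⟩
  simp

-- B-side: set cardinality equals list length iff the list has no duplicates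
theorem ofList_length_eq_iff (ws : List String) :
    (PySem.Set.ofList ws).length = ws.length ↔ ws.Nodup := by
  induction ws with
  | nil => simp [PySem.Set.ofList_nil]
  | cons w ws ih =>
    rw [PySem.Set.ofList_cons]
    by_cases h : w ∈ ws
    · constructor
      · intro hlen
        exfalso
        have hmem : w ∈ PySem.Set.ofList ws := (PySem.Set.mem_ofList ws w).mpr h
        have h1 : (PySem.Set.discard (PySem.Set.ofList ws) w).length < (PySem.Set.ofList ws).length :=
          length_discard_lt hmem
        have h2 : (PySem.Set.ofList ws).length ≤ ws.length := PySem.Set.length_ofList_le ws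
        simp only [List.length_cons] at hlen
        omega
      · intro hnd
        exact absurd ((List.nodup_cons.mp hnd).1) (fun hc => hc h)
    · have hmem : w ∉ PySem.Set.ofList ws := fun hc => h ((PySem.Set.mem_ofList ws w).mp hc)
      rw [discard_of_not_mem hmem]
      simp [List.nodup_cons, h, ih]

-- ===== VERDICT (by name: the statement is the Claim_ definition above) =====
theorem check_for_duplicates_spec : Claim_equal_check_for_duplicates := by
  intro crossword _ _
  unfold Spec_check_for_duplicates check_for_duplicates check_for_duplicates_alt
  set words := crossword.map (fun word => PySem.List.pyGetD word 0 "") with hw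
  rw [pvOuterA_eq_not_nodup]
  by_cases h : words.Nodup
  · simp [h, (ofList_length_eq_iff words).mpr h]
  · have : (PySem.Set.ofList words).length ≠ words.length := fun hc =>
      h ((ofList_length_eq_iff words).mp hc)
    simp [h, this]
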